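-- pv_equiv track=rewrite | github.com/Tommy1908/IntroProgramacionCC | segundoParcial.py | torneo_de_gallinas
-- ===== SOURCE A (Python) =====
-- def torneo_de_gallinas(estrategias: dict[str,str]) -> dict[str,int]:
--     res:dict[str,int] = {}
--
--     for jugador,estrategia in estrategias.items():
--         puntos: int = 0
--         for k,v in estrategias.items():
--             if jugador != k:
--                 if estrategia == "me la banco y no me desvio" and v == "me la banco y no me desvio":
--                     puntos -= 5
--                 elif estrategia == "me la banco y no me desvio" and v == "me desvio siempre":
--                     puntos += 10
--                 elif estrategia == "me desvio siempre" and v == "me la banco y no me desvio":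
--                     puntos -= 15
--                 else: #ambos desvios
--                     puntos -= 10
--             res[jugador] = puntos
--
--     return res
-- ===== SOURCE B (Python) =====
-- def torneo_de_gallinas(estrategias: dict[str, str]) -> dict[str, int]:
--     B = "me la banco y no me desvio"
--     D = "me desvio siempre"
--     n = len(estrategias)
--     cB = 0
--     cD = 0
--     for v in estrategias.values():
--         if v == B:
--             cB += 1
--         elif v == D:
--             cD += 1
--     res: dict[str, int] = {}
--     for jugador, s in estrategias.items():
--         if s == B:
--             res[jugador] = -5 * (cB - 1) + 10 * cD - 10 * (n - cB - cD)
--         elif s == D: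
--             res[jugador] = -15 * cB - 10 * (n - 1 - cB)
--         else:
--             res[jugador] = -10 * (n - 1)
--     return res
-- ===== Notes on version B (the rewrite author's own statement) =====
-- stated objective: faster
-- what changed: Replaced the quadratic all-pairs inner loop by one counting pass over the strategies and an O(1) closed-form score per player from the counts.
import Mathlib
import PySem

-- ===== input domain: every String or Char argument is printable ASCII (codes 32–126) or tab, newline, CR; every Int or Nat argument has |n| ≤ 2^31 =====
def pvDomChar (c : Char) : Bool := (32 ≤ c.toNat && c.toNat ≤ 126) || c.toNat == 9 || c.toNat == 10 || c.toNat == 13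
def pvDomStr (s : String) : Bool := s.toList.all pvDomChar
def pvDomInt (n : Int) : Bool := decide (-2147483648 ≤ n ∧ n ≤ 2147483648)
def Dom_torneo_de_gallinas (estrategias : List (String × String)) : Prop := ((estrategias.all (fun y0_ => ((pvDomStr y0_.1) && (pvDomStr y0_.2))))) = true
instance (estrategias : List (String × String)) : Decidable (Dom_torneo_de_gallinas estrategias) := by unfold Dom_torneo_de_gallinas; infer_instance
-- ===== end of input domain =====

-- B replaces A's quadratic all-pairs scan by one counting pass and an O(1) closed-form score per player (faster, asymptotic).


def bancoStr : String := "me la banco y no me desvio"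
def desvioStr : String := "me desvio siempre"

-- ===== PORT A =====
-- literal port: outer loop over the items, inner loop accumulating puntos and re-assigning res[jugador] each iteration
def torneo_de_gallinas (estrategias : List (String × String)) : List (String × Int) :=
  (estrategias.foldl (fun (res : PySem.Dict String Int) (je : String × String) =>
      (estrategias.foldl (fun (st : Int × PySem.Dict String Int) (kv : String × String) =>
          let p : Int :=
            if je.1 ≠ kv.1 then
              if je.2 = bancoStr ∧ kv.2 = bancoStr then st.1 - 5
              else if je.2 = bancoStr ∧ kv.2 = desvioStr then st.1 + 10
              else if je.2 = desvioStr ∧ kv.2 = bancoStr then st.1 - 15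
              else st.1 - 10
            else st.1
          (p, st.2.insert je.1 p)) (0, res)).2)
    PySem.Dict.empty).items

-- ===== PORT B =====
def torneo_de_gallinas_alt (estrategias : List (String × String)) : List (String × Int) :=
  let n : Int := estrategias.length
  let cs : Int × Int := estrategias.foldl (fun (c : Int × Int) kv =>
      if kv.2 = bancoStr then (c.1 + 1, c.2)
      else if kv.2 = desvioStr then (c.1, c.2 + 1)
      else c) (0, 0)
  let cB := cs.1
  let cD := cs.2
  (estrategias.foldl (fun (res : PySem.Dict String Int) (js : String × String) =>
      res.insert js.1
        (if js.2 = bancoStr then -5 * (cB - 1) + 10 * cD - 10 * (n - cB - cD)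
         else if js.2 = desvioStr then -15 * cB - 10 * (n - 1 - cB)
         else -10 * (n - 1))) PySem.Dict.empty).items

-- ===== PRECONDITION & SPEC =====
-- Pre_ excludes association lists with duplicate keys: the argument is a Python dict, whose keys are necessarily distinct.
def Pre_torneo_de_gallinas (estrategias : List (String × String)) : Prop :=
  (estrategias.map Prod.fst).Nodup
instance (estrategias : List (String × String)) : Decidable (Pre_torneo_de_gallinas estrategias) := by unfold Pre_torneo_de_gallinas; infer_instance
def pvWitness_torneo_de_gallinas : (List (String × String)) :=
  [("ana", "me la banco y no me desvio"), ("bob", "me desvio siempre"), ("eva", "otra")]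

def Spec_torneo_de_gallinas (estrategias : List (String × String)) (out : List (String × Int)) : Prop := out = torneo_de_gallinas_alt estrategias
instance (estrategias : List (String × String)) (out : List (String × Int)) : Decidable (Spec_torneo_de_gallinas estrategias out) := by unfold Spec_torneo_de_gallinas; infer_instance

-- ===== CLAIM (what is proved, stated in full; the proofs are below) =====
def Claim_equal_torneo_de_gallinas : Prop := ∀ (estrategias : List (String × String)), Dom_torneo_de_gallinas estrategias → Pre_torneo_de_gallinas estrategias → Spec_torneo_de_gallinas estrategias (torneo_de_gallinas estrategias)

-- ===== LEMMAS AND PROOFS =====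

-- score of strategy e against an opponent playing v (the four branches of A's inner if)
def pvScore (e v : String) : Int :=
  if e = bancoStr ∧ v = bancoStr then -5
  else if e = bancoStr ∧ v = desvioStr then 10
  else if e = desvioStr ∧ v = bancoStr then -15
  else -10

-- inner loop of A, clean pair form: accumulate points and repeatedly (re-)insert at key j
theorem pvInnerPair (j e : String) :
    ∀ (l : List (String × String)), l ≠ [] → ∀ (p0 : Int) (res : PySem.Dict String Int),
    (l.foldl (fun (st : Int × PySem.Dict String Int) (kv : String × String) =>
        ((if j ≠ kv.1 then st.1 + pvScore e kv.2 else st.1),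
         st.2.insert j (if j ≠ kv.1 then st.1 + pvScore e kv.2 else st.1))) (p0, res))
      = (l.foldl (fun (p : Int) kv => if j ≠ kv.1 then p + pvScore e kv.2 else p) p0,
         res.insert j (l.foldl (fun (p : Int) kv => if j ≠ kv.1 then p + pvScore e kv.2 else p) p0)) := by
  intro l
  induction l with
  | nil => intro h; exact absurd rfl h
  | cons kv t ih =>
    intro _ p0 res
    simp only [List.foldl_cons]
    rcases eq_or_ne t [] with rfl | ht
    · simp
    · rw [ih ht, PySem.Dict.insert_insert_self]

-- inner loop of A as written (the let-expanded branches), reduced to the pair form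
theorem pvInner (j e : String) :
    ∀ (l : List (String × String)), l ≠ [] → ∀ (p0 : Int) (res : PySem.Dict String Int),
    (l.foldl (fun (st : Int × PySem.Dict String Int) (kv : String × String) =>
        ((if j ≠ kv.1 then
            if e = bancoStr ∧ kv.2 = bancoStr then st.1 - 5
            else if e = bancoStr ∧ kv.2 = desvioStr then st.1 + 10
            else if e = desvioStr ∧ kv.2 = bancoStr then st.1 - 15
            else st.1 - 10
          else st.1),
         st.2.insert j
          (if j ≠ kv.1 then
            if e = bancoStr ∧ kv.2 = bancoStr then st.1 - 5
            else if e = bancoStr ∧ kv.2 = desvioStr then st.1 + 10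
            else if e = desvioStr ∧ kv.2 = bancoStr then st.1 - 15
            else st.1 - 10
          else st.1))) (p0, res))
      = (l.foldl (fun (p : Int) kv => if j ≠ kv.1 then p + pvScore e kv.2 else p) p0,
         res.insert j (l.foldl (fun (p : Int) kv => if j ≠ kv.1 then p + pvScore e kv.2 else p) p0)) := by
  have hstep : ∀ (p : Int) (kv : String × String),
      (if j ≠ kv.1 then
        if e = bancoStr ∧ kv.2 = bancoStr then p - 5
        else if e = bancoStr ∧ kv.2 = desvioStr then p + 10
        else if e = desvioStr ∧ kv.2 = bancoStr then p - 15
        else p - 10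
      else p) = (if j ≠ kv.1 then p + pvScore e kv.2 else p) := by
    intro p kv; unfold pvScore; split_ifs <;> omega
  intro l hl p0 res
  rw [show (fun (st : Int × PySem.Dict String Int) (kv : String × String) =>
        ((if j ≠ kv.1 then
            if e = bancoStr ∧ kv.2 = bancoStr then st.1 - 5
            else if e = bancoStr ∧ kv.2 = desvioStr then st.1 + 10
            else if e = desvioStr ∧ kv.2 = bancoStr then st.1 - 15
            else st.1 - 10
          else st.1),
         st.2.insert j
          (if j ≠ kv.1 then
            if e = bancoStr ∧ kv.2 = bancoStr then st.1 - 5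
            else if e = bancoStr ∧ kv.2 = desvioStr then st.1 + 10
            else if e = desvioStr ∧ kv.2 = bancoStr then st.1 - 15
            else st.1 - 10
          else st.1)))
      = (fun (st : Int × PySem.Dict String Int) (kv : String × String) =>
        ((if j ≠ kv.1 then st.1 + pvScore e kv.2 else st.1),
         st.2.insert j (if j ≠ kv.1 then st.1 + pvScore e kv.2 else st.1))) from
    funext fun st => funext fun kv => by rw [hstep]]
  exact pvInnerPair j e l hl p0 res

-- drop the conditional accumulation into a sum over the list
theorem pvInner_sum (j e : String) (l : List (String × String)) (p0 : Int) :
    l.foldl (fun (p : Int) kv => if j ≠ kv.1 then p + pvScore e kv.2 else p) p0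
      = p0 + (l.map (fun kv => if j ≠ kv.1 then pvScore e kv.2 else 0)).sum := by
  rw [show (fun (p : Int) (kv : String × String) => if j ≠ kv.1 then p + pvScore e kv.2 else p)
      = (fun (p : Int) kv => p + (if j ≠ kv.1 then pvScore e kv.2 else 0)) from
    funext fun p => funext fun kv => by split_ifs <;> omega]
  exact PySem.List.foldl_add _ _ _

-- with nodup keys and (j,e) ∈ l, skipping self removes exactly pvScore e e from the total
theorem pvSum_self (j e : String) (l : List (String × String))
    (hmem : (j, e) ∈ l) (hnd : (l.map Prod.fst).Nodup) :
    (l.map (fun kv => if j ≠ kv.1 then pvScore e kv.2 else 0)).sum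
      = (l.map (fun kv => pvScore e kv.2)).sum - pvScore e e := by
  induction l with
  | nil => cases hmem
  | cons kv t ih =>
    simp only [List.map_cons, List.nodup_cons] at hnd
    by_cases hk : j = kv.1
    · have hjt : j ∉ t.map Prod.fst := hk ▸ hnd.1
      have hkv : kv = (j, e) := by
        rcases List.mem_cons.mp hmem with h | h
        · exact h.symm
        · exact absurd (List.mem_map.mpr ⟨_, h, rfl⟩) hjt
      subst hkv
      have hrest : ∀ p ∈ t, (fun kv => if j ≠ kv.1 then pvScore e kv.2 else 0) p
          = (fun kv => pvScore e kv.2) p := by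
        intro p hp
        have : j ≠ p.1 := fun h => hjt (List.mem_map.mpr ⟨_, hp, h.symm⟩)
        simp [this]
      have h0 : (if j ≠ (j, e).1 then pvScore e (j, e).2 else 0) = 0 := by simp
      rw [List.map_cons, List.map_cons, List.sum_cons, List.sum_cons, h0,
          List.map_congr_left hrest]
      ring
    · have hmem' : (j, e) ∈ t := by
        rcases List.mem_cons.mp hmem with h | h
        · exact absurd (congrArg Prod.fst h) hk
        · exact h
      have hne : (if j ≠ kv.1 then pvScore e kv.2 else 0) = pvScore e kv.2 := by simp [hk]
      rw [List.map_cons, List.map_cons, List.sum_cons, List.sum_cons, hne, ih hmem' hnd.2]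
      ring

-- the total sum of scores in terms of the two strategy counts
theorem pvSum_counts (e : String) (l : List (String × String)) :
    (l.map (fun kv => pvScore e kv.2)).sum
      = (l.countP (fun kv => kv.2 = bancoStr) : Int) * pvScore e bancoStr
        + (l.countP (fun kv => kv.2 = desvioStr) : Int) * pvScore e desvioStr
        + ((l.length : Int) - l.countP (fun kv => kv.2 = bancoStr)
            - l.countP (fun kv => kv.2 = desvioStr)) * (-10) := by
  have hBD : bancoStr ≠ desvioStr := by decide
  induction l with
  | nil => simp
  | cons kv t ih =>
    have hclass : pvScore e kv.2 = if kv.2 = bancoStr then pvScore e bancoStr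
        else if kv.2 = desvioStr then pvScore e desvioStr else -10 := by
      unfold pvScore
      by_cases hb : kv.2 = bancoStr <;> by_cases hd : kv.2 = desvioStr <;>
        simp_all
    simp only [List.map_cons, List.sum_cons, List.countP_cons, List.length_cons, ih, hclass]
    have hDB : desvioStr ≠ bancoStr := hBD.symm
    by_cases hb : kv.2 = bancoStr
    · simp [hb, hBD]
      ring
    · by_cases hd : kv.2 = desvioStr
      · simp [hd, hDB]
        ring
      · simp [hb, hd]
        ring

-- B's single counting loop computes the two countP's
theorem pvCounts (l : List (String × String)) :
    l.foldl (fun (c : Int × Int) kv =>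
        if kv.2 = bancoStr then (c.1 + 1, c.2)
        else if kv.2 = desvioStr then (c.1, c.2 + 1)
        else c) (0, 0)
      = ((l.countP (fun kv => kv.2 = bancoStr) : Int),
         (l.countP (fun kv => kv.2 = desvioStr) : Int)) := by
  have shift : ∀ (t : List (String × String)) (a b : Int),
      t.foldl (fun (c : Int × Int) kv =>
        if kv.2 = bancoStr then (c.1 + 1, c.2)
        else if kv.2 = desvioStr then (c.1, c.2 + 1)
        else c) (a, b)
      = (a + (t.countP (fun kv => kv.2 = bancoStr) : Int),
         b + (t.countP (fun kv => kv.2 = desvioStr) : Int)) := by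
    intro t
    induction t with
    | nil => simp
    | cons kv t ih =>
      intro a b
      simp only [List.foldl_cons, List.countP_cons]
      by_cases hb : kv.2 = bancoStr
      · have hd : ¬ kv.2 = desvioStr := by rw [hb]; decide
        rw [if_pos hb, ih]
        refine Prod.ext (by simp [hb]; ring) (by simp [hb])
      · by_cases hd : kv.2 = desvioStr
        · rw [if_neg hb, if_pos hd, ih]
          refine Prod.ext (by simp [hd]) (by simp [hd]; ring)
        · rw [if_neg hb, if_neg hd, ih]
          refine Prod.ext ?_ ?_ <;> simp [hb, hd]
  rw [shift]
  refine Prod.ext ?_ ?_ <;> simp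

-- the per-player closed form of B equals A's pairwise accumulation
theorem pvFormula (j e : String) (l : List (String × String))
    (hmem : (j, e) ∈ l) (hnd : (l.map Prod.fst).Nodup) :
    (if e = bancoStr then
        -5 * ((l.countP (fun kv => kv.2 = bancoStr) : Int) - 1)
          + 10 * (l.countP (fun kv => kv.2 = desvioStr) : Int)
          - 10 * ((l.length : Int) - l.countP (fun kv => kv.2 = bancoStr)
                    - l.countP (fun kv => kv.2 = desvioStr))
      else if e = desvioStr then
        -15 * (l.countP (fun kv => kv.2 = bancoStr) : Int)
          - 10 * ((l.length : Int) - 1 - l.countP (fun kv => kv.2 = bancoStr))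
      else -10 * ((l.length : Int) - 1))
    = l.foldl (fun (p : Int) kv => if j ≠ kv.1 then p + pvScore e kv.2 else p) 0 := by
  rw [pvInner_sum, pvSum_self j e l hmem hnd, pvSum_counts]
  have hBD : ¬ bancoStr = desvioStr := by decide
  have hDB : ¬ desvioStr = bancoStr := by decide
  by_cases hb : e = bancoStr
  · subst hb
    rw [if_pos rfl]
    simp [pvScore, hDB]
    ring
  · by_cases hd : e = desvioStr
    · subst hd
      rw [if_neg hb, if_pos rfl]
      simp [pvScore, hBD, hDB]
      ring
    · rw [if_neg hb, if_neg hd]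
      simp [pvScore, hb, hd]
      ring

-- ===== VERDICT (by name: the statement is the Claim_ definition above) =====
theorem torneo_de_gallinas_spec : Claim_equal_torneo_de_gallinas := by
  intro es _ hpre
  have hknd : (es.map (fun je : String × String => je.1)).Nodup := hpre
  unfold Spec_torneo_de_gallinas torneo_de_gallinas torneo_de_gallinas_alt
  rcases eq_or_ne es [] with rfl | hne
  · rfl
  · simp only [pvCounts]
    have hbody : ∀ (acc : PySem.Dict String Int) (je : String × String), je ∈ es →
        (es.foldl (fun (st : Int × PySem.Dict String Int) (kv : String × String) =>
            ((if je.1 ≠ kv.1 then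
                if je.2 = bancoStr ∧ kv.2 = bancoStr then st.1 - 5
                else if je.2 = bancoStr ∧ kv.2 = desvioStr then st.1 + 10
                else if je.2 = desvioStr ∧ kv.2 = bancoStr then st.1 - 15
                else st.1 - 10
              else st.1),
             st.2.insert je.1
              (if je.1 ≠ kv.1 then
                if je.2 = bancoStr ∧ kv.2 = bancoStr then st.1 - 5
                else if je.2 = bancoStr ∧ kv.2 = desvioStr then st.1 + 10
                else if je.2 = desvioStr ∧ kv.2 = bancoStr then st.1 - 15
                else st.1 - 10
              else st.1))) (0, acc)).2
        = acc.insert je.1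
            (es.foldl (fun (p : Int) kv => if je.1 ≠ kv.1 then p + pvScore je.2 kv.2 else p) 0) := by
      intro acc je _
      rw [pvInner je.1 je.2 es hne 0 acc]
    rw [PySem.List.foldl_congr_mem es _ _ PySem.Dict.empty hbody]
    have hA := PySem.Dict.items_foldl_insert_fresh es (fun je : String × String => je.1)
        (fun je => es.foldl (fun (p : Int) kv => if je.1 ≠ kv.1 then p + pvScore je.2 kv.2 else p) 0)
        PySem.Dict.empty (fun _ _ => PySem.Dict.contains_empty _) hknd
    have hB := PySem.Dict.items_foldl_insert_fresh es (fun js : String × String => js.1)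
        (fun js =>
          if js.2 = bancoStr then
            -5 * ((es.countP (fun kv => kv.2 = bancoStr) : Int) - 1)
              + 10 * (es.countP (fun kv => kv.2 = desvioStr) : Int)
              - 10 * ((es.length : Int) - es.countP (fun kv => kv.2 = bancoStr)
                        - es.countP (fun kv => kv.2 = desvioStr))
          else if js.2 = desvioStr then
            -15 * (es.countP (fun kv => kv.2 = bancoStr) : Int)
              - 10 * ((es.length : Int) - 1 - es.countP (fun kv => kv.2 = bancoStr))
          else -10 * ((es.length : Int) - 1))
        PySem.Dict.empty (fun _ _ => PySem.Dict.contains_empty _) hknd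
    rw [hA, hB]
    refine congrArg (PySem.Dict.empty.items ++ ·) ?_
    apply List.map_congr_left
    intro je hje
    refine Prod.ext rfl ?_
    exact (pvFormula je.1 je.2 es (by simpa using hje) hpre).symm
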